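-- pv_equiv track=rewrite | github.com/Colonad/acpl-qwalk | acpl/data/graphs.py | _coalesce_undirected_edges
-- ===== SOURCE A (Python) =====
-- from collections.abc import Iterable, Sequence
--
-- def _coalesce_undirected_edges(
--     edges: Iterable[tuple[int, int]], num_nodes: int
-- ) -> list[tuple[int, int]]:
--     """
--     Deduplicate undirected edges, drop self-loops, keep canonical (min,max) ordering.
--     """
--     seen = set()
--     out: list[tuple[int, int]] = []
--     for u, v in edges:
--         if not (0 <= u < num_nodes and 0 <= v < num_nodes):
--             raise ValueError(f"Edge ({u},{v}) out of bounds for N={num_nodes}.")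
--         if u == v:
--             continue
--         a, b = (u, v) if u < v else (v, u)
--         if (a, b) not in seen:
--             seen.add((a, b))
--             out.append((a, b))
--     out.sort()
--     return out
-- ===== SOURCE B (Python) =====
-- def _coalesce_undirected_edges(edges, num_nodes):
--     canon = []
--     for u, v in edges:
--         if not (0 <= u < num_nodes and 0 <= v < num_nodes):
--             raise ValueError(f"Edge ({u},{v}) out of bounds for N={num_nodes}.")
--         if u == v:
--             continue
--         canon.append((u, v) if u < v else (v, u))
--     canon.sort()
--     out = []
--     for e in canon:
--         if not out or e != out[-1]:
--             out.append(e)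
--     return out
-- ===== Notes on version B (the rewrite author's own statement) =====
-- stated objective: alternative
-- what changed: Replaces A's hash-set membership dedup during the input pass by a one-pass canonicalize-and-collect, then sort, then a single adjacent-duplicate-removal scan over the sorted list.
import Mathlib
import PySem

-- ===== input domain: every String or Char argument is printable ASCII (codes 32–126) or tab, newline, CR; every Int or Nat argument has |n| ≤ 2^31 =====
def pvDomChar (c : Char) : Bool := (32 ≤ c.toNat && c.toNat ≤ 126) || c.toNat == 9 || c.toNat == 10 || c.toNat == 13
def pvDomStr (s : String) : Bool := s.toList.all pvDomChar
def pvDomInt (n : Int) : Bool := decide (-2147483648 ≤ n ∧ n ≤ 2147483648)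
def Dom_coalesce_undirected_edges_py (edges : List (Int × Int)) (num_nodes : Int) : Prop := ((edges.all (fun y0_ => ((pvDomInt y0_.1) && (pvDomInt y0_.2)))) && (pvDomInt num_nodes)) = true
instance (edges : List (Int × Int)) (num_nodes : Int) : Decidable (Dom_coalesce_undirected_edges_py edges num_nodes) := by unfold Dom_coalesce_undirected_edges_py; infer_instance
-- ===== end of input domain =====

-- B replaces A's hash-set membership dedup during the edge pass by canonicalize-collect, sort, then one adjacent-duplicate-removal scan (alternative algorithm, same cost).


-- ===== PORT A =====
-- loop body of A: skip self-loops, canonicalize to (min,max), set-membership dedup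
-- (the out-of-bounds ValueError branch is excluded by Pre_ below)
def coalesceStepA (st : PySem.Set (Int × Int) × List (Int × Int)) (e : Int × Int) :
    PySem.Set (Int × Int) × List (Int × Int) :=
  if e.1 = e.2 then st
  else
    let ab := if e.1 < e.2 then e else (e.2, e.1)
    if PySem.Set.contains st.1 ab then st
    else (PySem.Set.add st.1 ab, st.2 ++ [ab])

def coalesce_undirected_edges_py (edges : List (Int × Int)) (num_nodes : Int) : List (Int × Int) :=
  PySem.List.sorted2 (edges.foldl coalesceStepA (PySem.Set.empty, [])).2 (fun p => p.1) (fun p => p.2)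

-- ===== PORT B =====
-- adjacent-duplicate-removal step of B's final scan ('if not out or e != out[-1]: out.append(e)')
def dedupStepB (out : List (Int × Int)) (e : Int × Int) : List (Int × Int) :=
  if out = [] ∨ out.getLast? ≠ some e then out ++ [e] else out

def coalesce_undirected_edges_py_alt (edges : List (Int × Int)) (num_nodes : Int) : List (Int × Int) :=
  (PySem.List.sorted2
    (edges.foldl
      (fun (acc : List (Int × Int)) (e : Int × Int) =>
        if e.1 = e.2 then acc else acc ++ [if e.1 < e.2 then e else (e.2, e.1)]) [])
    (fun p => p.1) (fun p => p.2)).foldl dedupStepB []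

-- ===== PRECONDITION & SPEC =====
-- Pre_ excludes exactly the inputs on which A (and B alike) raises ValueError: some edge endpoint outside [0, num_nodes).
def Pre_coalesce_undirected_edges_py (edges : List (Int × Int)) (num_nodes : Int) : Prop :=
  ∀ e ∈ edges, 0 ≤ e.1 ∧ e.1 < num_nodes ∧ 0 ≤ e.2 ∧ e.2 < num_nodes
instance (edges : List (Int × Int)) (num_nodes : Int) : Decidable (Pre_coalesce_undirected_edges_py edges num_nodes) := by unfold Pre_coalesce_undirected_edges_py; infer_instance

def pvWitness_coalesce_undirected_edges_py : (List (Int × Int)) × Int := ([(0, 1), (2, 1), (1, 0), (1, 1)], 3)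

def Spec_coalesce_undirected_edges_py (edges : List (Int × Int)) (num_nodes : Int) (out : List (Int × Int)) : Prop := out = coalesce_undirected_edges_py_alt edges num_nodes
instance (edges : List (Int × Int)) (num_nodes : Int) (out : List (Int × Int)) : Decidable (Spec_coalesce_undirected_edges_py edges num_nodes out) := by unfold Spec_coalesce_undirected_edges_py; infer_instance

-- ===== CLAIM (what is proved, stated in full; the proofs are below) =====
def Claim_equal_coalesce_undirected_edges_py : Prop := ∀ (edges : List (Int × Int)) (num_nodes : Int), Dom_coalesce_undirected_edges_py edges num_nodes → Pre_coalesce_undirected_edges_py edges num_nodes → Spec_coalesce_undirected_edges_py edges num_nodes (coalesce_undirected_edges_py edges num_nodes)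

-- ===== LEMMAS AND PROOFS =====

-- the canonical multiset both programs collect: self-loops dropped, each edge as (min,max)
def canonOf (edges : List (Int × Int)) : List (Int × Int) :=
  (edges.filter (fun e => decide ¬(e.1 = e.2))).map (fun e => if e.1 < e.2 then e else (e.2, e.1))

lemma canonOf_cons_self {e : Int × Int} (t : List (Int × Int)) (h : e.1 = e.2) :
    canonOf (e :: t) = canonOf t := by
  simp [canonOf, h]

lemma canonOf_cons {e : Int × Int} (t : List (Int × Int)) (h : ¬ e.1 = e.2) :
    canonOf (e :: t) = (if e.1 < e.2 then e else (e.2, e.1)) :: canonOf t := by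
  simp [canonOf, h]

-- B's first loop collects exactly canonOf edges
lemma b_canon_eq (edges : List (Int × Int)) :
    edges.foldl
      (fun (acc : List (Int × Int)) (e : Int × Int) =>
        if e.1 = e.2 then acc else acc ++ [if e.1 < e.2 then e else (e.2, e.1)]) []
      = canonOf edges := by
  have h := PySem.List.foldl_append_ite (p := fun e : Int × Int => ¬(e.1 = e.2))
      (f := fun e : Int × Int => if e.1 < e.2 then e else (e.2, e.1)) edges []
  simp only [ite_not] at h
  simpa [canonOf] using h

-- A's loop keeps seen = out as lists; with state (s, s) it is a fold of Set.add over canonOf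
lemma a_fold_eq (edges : List (Int × Int)) (s : PySem.Set (Int × Int)) :
    edges.foldl coalesceStepA (s, s)
      = ((canonOf edges).foldl PySem.Set.add s, (canonOf edges).foldl PySem.Set.add s) := by
  induction edges generalizing s with
  | nil => rfl
  | cons e t ih =>
    by_cases h : e.1 = e.2
    · have hstep : coalesceStepA (s, s) e = (s, s) := by simp [coalesceStepA, h]
      rw [List.foldl_cons, hstep, ih, canonOf_cons_self t h]
    · have hstep : coalesceStepA (s, s) e =
          (PySem.Set.add s (if e.1 < e.2 then e else (e.2, e.1)),
           PySem.Set.add s (if e.1 < e.2 then e else (e.2, e.1))) := by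
        simp only [coalesceStepA, h, if_false, PySem.Set.add]
        split <;> split <;> simp_all
      rw [List.foldl_cons, hstep, ih, canonOf_cons t h, List.foldl_cons]

-- sorting pairs by the tuple key (fst, snd) is sorting by the lexicographic key
lemma sorted2_eq_sorted_lex (xs : List (Int × Int)) :
    PySem.List.sorted2 xs (fun p => p.1) (fun p => p.2)
      = PySem.List.sorted xs (fun p => toLex p) := by
  have hb : (fun (a b : Int × Int) =>
        (decide (a.1 < b.1) || (!decide (b.1 < a.1) && decide (a.2 < b.2))))
      = (fun (a b : Int × Int) => decide (toLex a < toLex b)) := by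
    funext a b
    by_cases h1 : a.1 < b.1 <;> by_cases h2 : b.1 < a.1 <;> by_cases h3 : a.2 < b.2 <;>
      simp [Prod.Lex.toLex_lt_toLex, h1, h2, h3] <;> omega
  show List.foldl (fun acc x => PySem.List.insertBy (fun (a b : Int × Int) =>
        (decide (a.1 < b.1) || (!decide (b.1 < a.1) && decide (a.2 < b.2)))) x acc) [] xs
      = PySem.List.sorted xs (fun p => toLex p)
  rw [hb]
  rfl

-- every member of a Pairwise-R list is its last element or R-related to it
lemma pairwise_mem_getLast {α : Type} {R : α → α → Prop} {l : List α} (hne : l ≠ [])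
    (hp : l.Pairwise R) {a : α} (ha : a ∈ l) : a = l.getLast hne ∨ R a (l.getLast hne) := by
  induction l with
  | nil => exact absurd rfl hne
  | cons x t ih =>
    cases t with
    | nil => simp at ha; simp [ha]
    | cons y u =>
      have hlast : (x :: y :: u).getLast hne = (y :: u).getLast (by simp) :=
        List.getLast_cons (by simp)
      rcases List.mem_cons.1 ha with rfl | ha'
      · right
        rw [hlast]
        exact (List.pairwise_cons.1 hp).1 _ (List.getLast_mem _)
      · rcases ih (by simp) (List.pairwise_cons.1 hp).2 ha' with h | h
        · left; rw [hlast, ← h]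
        · right; rw [hlast]; exact h

-- B's scan over a ≤lex-sorted list: result is strictly <lex-increasing with the same members
lemma scan_spec (zs : List (Int × Int)) : ∀ (acc : List (Int × Int)),
    (acc ++ zs).Pairwise (fun a b => toLex a ≤ toLex b) →
    acc.Pairwise (fun a b => toLex a < toLex b) →
    (zs.foldl dedupStepB acc).Pairwise (fun a b => toLex a < toLex b)
      ∧ ∀ x, x ∈ zs.foldl dedupStepB acc ↔ x ∈ acc ∨ x ∈ zs := by
  induction zs with
  | nil =>
    intro acc h hacc
    exact ⟨hacc, fun x => by simp⟩
  | cons e zs ih =>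
    intro acc h hacc
    rw [List.foldl_cons]
    by_cases hc : acc = [] ∨ acc.getLast? ≠ some e
    · have hstep : dedupStepB acc e = acc ++ [e] := if_pos hc
      rw [hstep]
      by_cases hnil : acc = []
      · subst hnil
        obtain ⟨h1, h2⟩ := ih [e] (by simpa using h) (by simp)
        exact ⟨h1, fun x => by simpa using h2 x⟩
      · have hne : acc.getLast? ≠ some e := by tauto
        have hL : acc.getLast? = some (acc.getLast hnil) := List.getLast?_eq_some_getLast hnil
        have hLne : acc.getLast hnil ≠ e := fun hh => hne (hL.trans (congrArg some hh))
        have hle : ∀ a ∈ acc, ∀ b ∈ e :: zs, toLex a ≤ toLex b :=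
          (List.pairwise_append.1 h).2.2
        have hLlt : toLex (acc.getLast hnil) < toLex e :=
          lt_of_le_of_ne (hle _ (List.getLast_mem hnil) e (by simp))
            (fun hh => hLne (toLex.injective hh))
        have hlt : ∀ a ∈ acc, toLex a < toLex e := by
          intro a ha
          rcases pairwise_mem_getLast hnil hacc ha with rfl | hrel
          · exact hLlt
          · exact lt_trans hrel hLlt
        have hacc' : (acc ++ [e]).Pairwise (fun a b => toLex a < toLex b) :=
          List.pairwise_append.2 ⟨hacc, by simp, by simpa using hlt⟩
        have h' : ((acc ++ [e]) ++ zs).Pairwise (fun a b => toLex a ≤ toLex b) := by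
          simpa [List.append_assoc] using h
        obtain ⟨h1, h2⟩ := ih (acc ++ [e]) h' hacc'
        refine ⟨h1, fun x => ?_⟩
        rw [h2 x]
        simp only [List.mem_append, List.mem_cons]
        tauto
    · obtain ⟨hnil, hlast'⟩ := not_or.1 hc
      have hlast : acc.getLast? = some e := not_not.1 hlast'
      have hstep : dedupStepB acc e = acc := if_neg (by simp [hnil, hlast])
      rw [hstep]
      have he_mem : e ∈ acc := List.mem_of_getLast? hlast
      have h' : (acc ++ zs).Pairwise (fun a b => toLex a ≤ toLex b) :=
        h.sublist (List.Sublist.append_left (List.sublist_cons_self e zs) acc)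
      obtain ⟨h1, h2⟩ := ih acc h' hacc
      refine ⟨h1, fun x => ?_⟩
      rw [h2 x]
      simp only [List.mem_cons]
      constructor
      · tauto
      · rintro (hx | rfl | hx) <;> tauto

-- ===== VERDICT (by name: the statement is the Claim_ definition above) =====
theorem coalesce_undirected_edges_py_spec : Claim_equal_coalesce_undirected_edges_py := by
  intro edges num_nodes _ _
  show coalesce_undirected_edges_py edges num_nodes = coalesce_undirected_edges_py_alt edges num_nodes
  unfold coalesce_undirected_edges_py coalesce_undirected_edges_py_alt
  rw [b_canon_eq, show (PySem.Set.empty : PySem.Set (Int × Int)) = [] from rfl,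
    a_fold_eq edges ([] : PySem.Set (Int × Int)), sorted2_eq_sorted_lex,
    sorted2_eq_sorted_lex]
  obtain ⟨hpw, hmem⟩ := scan_spec (PySem.List.sorted (canonOf edges) (fun p => toLex p)) []
    (by simpa using PySem.List.sorted_pairwise (canonOf edges) (fun p => toLex p))
    List.Pairwise.nil
  have hnodup : (List.foldl dedupStepB []
      (PySem.List.sorted (canonOf edges) (fun p => toLex p))).Nodup :=
    hpw.imp (fun h => fun he => absurd (congrArg toLex he) (ne_of_lt h))
  have hperm : (List.foldl dedupStepB []
      (PySem.List.sorted (canonOf edges) (fun p => toLex p))).Perm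
      (PySem.Set.ofList (canonOf edges)) :=
    (List.perm_ext_iff_of_nodup hnodup (PySem.Set.nodup_ofList _)).2
      (fun a => by simp [PySem.Set.mem_ofList, hmem a, PySem.List.mem_sorted])
  exact PySem.List.sorted_eq_of_perm_of_pairwise_lt _ _ _ hperm hpw
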